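-- pv_equiv track=rewrite | github.com/piyushtiw/MachineLearning-in-Python | CommunityDetection/sac1.py | sequential_clusters
-- ===== SOURCE A (Python) =====
-- def sequential_clusters(C):
--   mapping = {}
--   newC = []
--   c = 0
--   for i in C:
--     if i in mapping:
--       newC.append(mapping[i])
--     else:
--       newC.append(c)
--       mapping[i] = c
--       c = c + 1
--   return newC
-- ===== SOURCE B (Python) =====
-- def sequential_clusters(C):
--     # Closed form, no dict/counter: the sequential id of value i is the number of
--     # distinct values appearing strictly before i's first occurrence.
--     return [len(set(C[:C.index(i)])) for i in C]
-- ===== Notes on version B (the rewrite author's own statement) =====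
-- stated objective: alternative
-- what changed: Drops A's dict/counter/output-accumulator state machine entirely: B is a stateless closed form computing each element's id as len(set(C[:C.index(i)])), the count of distinct values before that value's first occurrence (O(n^2) instead of O(n), no mapping built).
import Mathlib
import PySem

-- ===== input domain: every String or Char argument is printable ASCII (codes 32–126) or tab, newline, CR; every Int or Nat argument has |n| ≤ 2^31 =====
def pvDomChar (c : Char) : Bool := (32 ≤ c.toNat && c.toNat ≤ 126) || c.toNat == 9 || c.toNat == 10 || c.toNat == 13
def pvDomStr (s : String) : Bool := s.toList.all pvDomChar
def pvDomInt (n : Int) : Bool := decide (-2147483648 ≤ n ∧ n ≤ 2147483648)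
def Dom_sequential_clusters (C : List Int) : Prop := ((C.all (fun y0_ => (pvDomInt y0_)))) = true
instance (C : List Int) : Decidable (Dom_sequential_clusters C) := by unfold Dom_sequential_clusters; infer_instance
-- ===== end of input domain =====

-- B replaces A's stateful dict+counter loop by a stateless closed form: the id of each
-- element is the number of distinct values strictly before its first occurrence (alternative decomposition).

-- ===== PORT A =====
-- loop state: (mapping, newC, c)
def seqAStep (st : PySem.Dict Int Int × List Int × Int) (i : Int) :
    PySem.Dict Int Int × List Int × Int :=
  if st.1.contains i then (st.1, st.2.1 ++ [st.1.getD i 0], st.2.2)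
  else (st.1.insert i st.2.2, st.2.1 ++ [st.2.2], st.2.2 + 1)

def sequential_clusters (C : List Int) : List Int :=
  (C.foldl seqAStep (PySem.Dict.empty, [], 0)).2.1

-- ===== PORT B =====
-- len(set(C[:C.index(i)])); C.index(i) never raises here since i is drawn from C,
-- so the '.getD 0' totalisation of index? is never taken.
def seqBVal (C : List Int) (i : Int) : Int :=
  ((PySem.Set.ofList (PySem.List.slice C none
      (some (((PySem.List.index? C i).getD 0 : Nat) : Int)))).length : Int)

def sequential_clusters_alt (C : List Int) : List Int :=
  C.map (seqBVal C)

-- ===== PRECONDITION & SPEC =====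
def Spec_sequential_clusters (C : List Int) (out : List Int) : Prop := out = sequential_clusters_alt C
instance (C : List Int) (out : List Int) : Decidable (Spec_sequential_clusters C out) := by unfold Spec_sequential_clusters; infer_instance

-- ===== CLAIM (what is proved, stated in full; the proofs are below) =====
def Claim_equal_sequential_clusters : Prop := ∀ (C : List Int), Dom_sequential_clusters C → Spec_sequential_clusters C (sequential_clusters C)

-- ===== LEMMAS AND PROOFS =====

-- B's value at a value first occurring right after prefix P is the distinct count of P
theorem seqBVal_first (P rest : List Int) (i : Int) (hP : i ∉ P) :
    seqBVal (P ++ i :: rest) i = ((PySem.Set.ofList P).length : Int) := by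
  have hidx : PySem.List.index? (P ++ i :: rest) i = some P.length := by
    rw [PySem.List.index?_eq_some_iff]; exact ⟨P, rest, rfl, rfl, hP⟩
  unfold seqBVal
  rw [hidx]
  simp [PySem.List.slice_to_natCast]

-- appending an already-seen element does not change the distinct set
theorem ofList_append_mem (P : List Int) (i : Int) (h : i ∈ P) :
    PySem.Set.ofList (P ++ [i]) = PySem.Set.ofList P := by
  rw [PySem.Set.ofList_eq_foldl, List.foldl_append]
  simp [PySem.Set.add, PySem.Set.contains, ← PySem.Set.ofList_eq_foldl, PySem.Set.mem_ofList, h]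

-- appending a new element extends the distinct set by one
theorem ofList_append_not_mem (P : List Int) (i : Int) (h : i ∉ P) :
    PySem.Set.ofList (P ++ [i]) = PySem.Set.ofList P ++ [i] := by
  rw [PySem.Set.ofList_eq_foldl, List.foldl_append]
  simp [PySem.Set.add, PySem.Set.contains, ← PySem.Set.ofList_eq_foldl, PySem.Set.mem_ofList, h]

-- invariant for A's fold: the dict holds exactly the processed prefix P, each key at
-- B's closed-form value, and the counter is P's distinct count
theorem main_inv (C : List Int) (rest : List Int) : ∀ (P : List Int) (m : PySem.Dict Int Int)
    (acc : List Int) (c : Int),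
    C = P ++ rest →
    (∀ i, m.contains i = true ↔ i ∈ P) →
    (∀ i ∈ P, m.getD i 0 = seqBVal C i) →
    c = ((PySem.Set.ofList P).length : Int) →
    (rest.foldl seqAStep (m, acc, c)).2.1 = acc ++ rest.map (seqBVal C) := by
  induction rest with
  | nil => intros; simp
  | cons i rest' ih =>
    intro P m acc c hC h1 h2 h3
    simp only [List.foldl_cons, List.map_cons, seqAStep]
    by_cases h : m.contains i = true
    · rw [if_pos h]
      have hiP : i ∈ P := (h1 i).mp h
      rw [ih (P ++ [i]) m _ c (by simpa using hC)
        (by intro j; rw [h1 j]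
            simp only [List.mem_append, List.mem_singleton]
            constructor
            · exact Or.inl
            · rintro (hj | rfl); exacts [hj, hiP])
        (by intro j hj
            rcases List.mem_append.mp hj with hj | hj
            · exact h2 j hj
            · rw [List.mem_singleton] at hj; rw [hj]; exact h2 i hiP)
        (by rw [h3, ofList_append_mem P i hiP])]
      rw [h2 i hiP]
      simp
    · rw [if_neg h]
      have hiP : i ∉ P := fun hm => h ((h1 i).mpr hm)
      have hv : seqBVal C i = c := by
        rw [hC, seqBVal_first P rest' i hiP, h3]
      rw [ih (P ++ [i]) (m.insert i c) _ (c + 1) (by simpa using hC)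
        (by intro j; rw [PySem.Dict.contains_insert]; simp [h1 j]; tauto)
        (by intro j hj; simp at hj; rcases hj with hj | hj
            · rw [PySem.Dict.getD_insert]
              have : j ≠ i := fun e => hiP (e ▸ hj)
              simp [this]; exact h2 j hj
            · rw [hj, PySem.Dict.getD_insert_self]; exact hv.symm
        )
        (by rw [h3, ofList_append_not_mem P i hiP]; simp [List.length_append])]
      rw [hv]
      simp

-- ===== VERDICT (by name: the statement is the Claim_ definition above) =====
theorem sequential_clusters_spec : Claim_equal_sequential_clusters := by
  intro C _
  show sequential_clusters C = sequential_clusters_alt C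
  unfold sequential_clusters sequential_clusters_alt
  simpa using main_inv C C [] PySem.Dict.empty [] 0 rfl
    (by intro i; simp [PySem.Dict.contains, PySem.Dict.empty])
    (by intro i h; simp at h) (by simp)
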